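-- pv_equiv track=rewrite | github.com/amitkmr/coding-questions | DynamicProgramming/count_number_of_hops.py | number_of_hops
-- ===== SOURCE A (Python) =====
-- def number_of_hops(n,rem):
--     if n<0:
--         return 0
--     if n==0:
--         return 1
--
--     if rem[n]!= -1:
--         return rem[n]
--
--     steps = [1,2,3]
--     hops = 0
--     for step in steps:
--         hops = hops + number_of_hops(n-step,rem)
--     rem[n] = hops
--     return hops
-- ===== SOURCE B (Python) =====
-- def number_of_hops(n, rem):
--     # Iterative bottom-up sliding window instead of A's memoized recursion.
--     # Return value only: A also mutates rem (fills memo entries); B leaves rem untouched.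
--     if n < 0:
--         return 0
--     a, b, c = 0, 0, 1
--     for k in range(1, n + 1):
--         v = rem[k] if rem[k] != -1 else a + b + c
--         a, b, c = b, c, v
--     return c
-- ===== Notes on version B (the rewrite author's own statement) =====
-- stated objective: simpler
-- what changed: Replaces A's top-down memoized recursion (which threads and mutates the rem list) with a single bottom-up loop keeping a 3-value sliding window, honouring pre-seeded rem entries; B does not mutate rem (return-value equivalence).
import Mathlib
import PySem

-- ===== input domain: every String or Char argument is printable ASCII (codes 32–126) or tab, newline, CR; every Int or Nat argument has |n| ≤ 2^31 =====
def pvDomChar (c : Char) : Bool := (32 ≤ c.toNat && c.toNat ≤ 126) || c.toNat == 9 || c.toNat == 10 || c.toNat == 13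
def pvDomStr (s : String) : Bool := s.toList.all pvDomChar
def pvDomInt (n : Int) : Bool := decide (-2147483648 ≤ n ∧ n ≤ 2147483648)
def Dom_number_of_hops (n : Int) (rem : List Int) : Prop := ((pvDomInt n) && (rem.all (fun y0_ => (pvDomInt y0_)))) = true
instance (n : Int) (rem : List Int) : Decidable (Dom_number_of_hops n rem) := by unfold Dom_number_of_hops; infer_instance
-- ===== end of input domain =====

-- B replaces A's memoized recursion by a bottom-up constant-space sliding-window loop (simpler);
-- equivalence is about the RETURN value only: A mutates rem (fills memo entries), B does not.

-- ===== PORT A =====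
-- A's recursion both reads and writes rem, so the transliteration threads the list:
-- the helper returns (return value, rem after the call).  rem[n] read → pyGetD (the default -1
-- is only taken outside Pre_, where Python raises IndexError); rem[n] = hops → pySetD.
def hopsA (n : Int) (rem : List Int) : Int × List Int :=
  if n < 0 then (0, rem)
  else if n = 0 then (1, rem)
  else
    let e := PySem.List.pyGetD rem n (-1)
    if e ≠ -1 then (e, rem)
    else
      -- for step in [1,2,3]: hops = hops + number_of_hops(n-step, rem)
      let p1 := hopsA (n - 1) rem
      let p2 := hopsA (n - 2) p1.2
      let p3 := hopsA (n - 3) p2.2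
      let hops := 0 + p1.1 + p2.1 + p3.1
      (hops, PySem.List.pySetD p3.2 n hops)
termination_by n.toNat
decreasing_by all_goals omega

def number_of_hops (n : Int) (rem : List Int) : Int := (hopsA n rem).1

-- ===== PORT B =====
def number_of_hops_alt (n : Int) (rem : List Int) : Int :=
  if n < 0 then 0
  else
    (((PySem.List.pyRange 1 (n + 1) 1).foldl
      (fun (t : Int × Int × Int) k =>
        let e := PySem.List.pyGetD rem k (-1)
        let v := if e ≠ -1 then e else t.1 + t.2.1 + t.2.2
        (t.2.1, t.2.2, v))
      (0, 0, 1)) : Int × Int × Int).2.2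

-- ===== PRECONDITION & SPEC =====
-- Python A raises IndexError exactly when 1 ≤ n and n ≥ len(rem) (rem[k] is read for every 1 ≤ k ≤ n).
def Pre_number_of_hops (n : Int) (rem : List Int) : Prop := n ≤ 0 ∨ n < (rem.length : Int)
instance (n : Int) (rem : List Int) : Decidable (Pre_number_of_hops n rem) := by unfold Pre_number_of_hops; infer_instance
def pvWitness_number_of_hops : Int × List Int := (3, [-1, -1, -1, -1])

def Spec_number_of_hops (n : Int) (rem : List Int) (out : Int) : Prop := out = number_of_hops_alt n rem
instance (n : Int) (rem : List Int) (out : Int) : Decidable (Spec_number_of_hops n rem out) := by unfold Spec_number_of_hops; infer_instance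

-- ===== CLAIM (what is proved, stated in full; the proofs are below) =====
def Claim_equal_number_of_hops : Prop := ∀ (n : Int) (rem : List Int), Dom_number_of_hops n rem → Pre_number_of_hops n rem → Spec_number_of_hops n rem (number_of_hops n rem)

-- ===== LEMMAS AND PROOFS =====

-- Pure (mutation-free) value of A's recursion, reading the ORIGINAL rem.
def gPure (n : Int) (rem : List Int) : Int :=
  if n < 0 then 0
  else if n = 0 then 1
  else
    let e := PySem.List.pyGetD rem n (-1)
    if e ≠ -1 then e
    else gPure (n - 1) rem + gPure (n - 2) rem + gPure (n - 3) rem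
termination_by n.toNat
decreasing_by all_goals omega

lemma gPure_neg (n : Int) (rem : List Int) (h : n < 0) : gPure n rem = 0 := by
  rw [gPure]; simp [h]

lemma gPure_zero (rem : List Int) : gPure 0 rem = 1 := by
  rw [gPure]; simp

lemma gPure_pos (n : Int) (rem : List Int) (h : 1 ≤ n) :
    gPure n rem =
      if PySem.List.pyGetD rem n (-1) ≠ -1 then PySem.List.pyGetD rem n (-1)
      else gPure (n - 1) rem + gPure (n - 2) rem + gPure (n - 3) rem := by
  rw [gPure, if_neg (by omega : ¬ n < 0), if_neg (by omega : ¬ n = 0)]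

-- Memo-consistency: every positive entry of rem is either the original rem₀ entry,
-- or a memo value gPure j rem₀ written over an originally unset (-1) slot.
def MemoInv (rem₀ rem : List Int) : Prop :=
  ∀ j : Int, 1 ≤ j →
    PySem.List.pyGetD rem j (-1) = PySem.List.pyGetD rem₀ j (-1) ∨
    (PySem.List.pyGetD rem₀ j (-1) = -1 ∧ PySem.List.pyGetD rem j (-1) = gPure j rem₀)

lemma pyGetD_set_pos (xs : List Int) (i j v d : Int) (hi : 0 ≤ i) (hj : 0 ≤ j) :
    PySem.List.pyGetD (xs.set i.toNat v) j d =
      if j = i ∧ i < (xs.length : Int) then v else PySem.List.pyGetD xs j d := by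
  rw [PySem.List.pyGetD_of_nonneg _ _ hj]
  conv_rhs => rw [PySem.List.pyGetD_of_nonneg _ d hj]
  simp only [List.getD, List.getElem?_set]
  by_cases h : j = i ∧ i < (xs.length : Int)
  · obtain ⟨rfl, hlt⟩ := h
    simp [show j.toNat < xs.length by omega]
    exact fun hle => absurd hlt (by omega)
  · rw [if_neg h]
    by_cases he : i.toNat = j.toNat
    · by_cases hni : i < (xs.length : Int)
      · exact absurd ⟨by omega, hni⟩ h
      · rw [if_pos he, if_neg (by omega)]
        rw [List.getElem?_eq_none (by omega : xs.length ≤ j.toNat)]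
    · rw [if_neg he]

lemma hopsA_correct :
    ∀ (m : Nat) (n : Int), n.toNat < m → ∀ (rem₀ rem : List Int), MemoInv rem₀ rem →
      (hopsA n rem).1 = gPure n rem₀ ∧ MemoInv rem₀ (hopsA n rem).2 := by
  intro m
  induction m with
  | zero => intro n hn; omega
  | succ m ih =>
    intro n hn rem₀ rem hI
    by_cases h0 : n < 0
    · rw [hopsA]; rw [gPure_neg _ _ h0]; simp [h0, hI]
    · by_cases h1 : n = 0
      · subst h1; rw [hopsA]; rw [gPure_zero]; simp [hI]
      · have hpos : 1 ≤ n := by omega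
        rw [hopsA]
        simp only [if_neg (by omega : ¬ n < 0), if_neg h1]
        by_cases he : PySem.List.pyGetD rem n (-1) ≠ -1
        · simp only [if_pos he]
          refine ⟨?_, hI⟩
          rcases hI n hpos with heq | ⟨h', hw⟩
          · rw [gPure_pos _ _ hpos, ← heq]
            simp [he]
          · exact hw
        · push Not at he
          simp only [he, if_neg (by simp : ¬ ((-1:Int) ≠ -1))]
          have hr0 : PySem.List.pyGetD rem₀ n (-1) = -1 := by
            rcases hI n hpos with heq | ⟨h', _⟩
            · omega
            · exact h'
          obtain ⟨e1, i1⟩ := ih (n-1) (by omega) rem₀ rem hI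
          obtain ⟨e2, i2⟩ := ih (n-2) (by omega) rem₀ _ i1
          obtain ⟨e3, i3⟩ := ih (n-3) (by omega) rem₀ _ i2
          have hg : gPure n rem₀ = gPure (n-1) rem₀ + gPure (n-2) rem₀ + gPure (n-3) rem₀ := by
            rw [gPure_pos _ _ hpos, hr0]
            simp
          constructor
          · rw [e1, e2, e3, hg]; ring
          · -- the write rem[n] = hops
            rw [PySem.List.pySetD_of_nonneg _ _ (by omega : (0:Int) ≤ n)]
            intro j hj
            rw [pyGetD_set_pos _ _ _ _ _ (by omega) (by omega)]
            by_cases hc : j = n ∧ n <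
                (((hopsA (n-3) (hopsA (n-2) (hopsA (n-1) rem).2).2).2.length : Int))
            · rw [if_pos hc]
              right
              refine ⟨hc.1 ▸ hr0, ?_⟩
              rw [hc.1, hg, e1, e2, e3]
              ring
            · rw [if_neg hc]
              exact i3 j hj

lemma foldB (rem : List Int) :
    ∀ (m : Nat),
      ((PySem.List.pyRange 1 ((m : Int) + 1) 1).foldl
        (fun (t : Int × Int × Int) k =>
          let e := PySem.List.pyGetD rem k (-1)
          let v := if e ≠ -1 then e else t.1 + t.2.1 + t.2.2
          (t.2.1, t.2.2, v))
        (0, 0, 1)) =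
      (gPure ((m : Int) - 2) rem, gPure ((m : Int) - 1) rem, gPure (m : Int) rem) := by
  intro m
  induction m with
  | zero =>
    rw [PySem.List.pyRange_one_eq_nil (by norm_num)]
    simp only [List.foldl_nil, Nat.cast_zero]
    rw [gPure_neg _ _ (by norm_num), gPure_neg _ _ (by norm_num), gPure_zero]
  | succ m ih =>
    rw [show ((m + 1 : Nat) : Int) + 1 = ((m : Int) + 1) + 1 by push_cast; ring]
    rw [PySem.List.pyRange_one_succ_right (by omega)]
    rw [List.foldl_append, ih]
    simp only [List.foldl_cons, List.foldl_nil]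
    have hv : gPure ((m : Int) + 1) rem =
        (if PySem.List.pyGetD rem ((m : Int) + 1) (-1) ≠ -1
         then PySem.List.pyGetD rem ((m : Int) + 1) (-1)
         else gPure ((m : Int) - 2) rem + gPure ((m : Int) - 1) rem + gPure (m : Int) rem) := by
      rw [gPure_pos _ _ (by omega)]
      by_cases he : PySem.List.pyGetD rem ((m : Int) + 1) (-1) ≠ -1
      · rw [if_pos he, if_pos he]
      · rw [if_neg he, if_neg he]
        rw [show (m : Int) + 1 - 1 = (m : Int) by ring,
            show (m : Int) + 1 - 2 = (m : Int) - 1 by ring,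
            show (m : Int) + 1 - 3 = (m : Int) - 2 by ring]
        ring
    rw [show ((m + 1 : Nat) : Int) - 2 = (m : Int) - 1 by push_cast; ring,
        show ((m + 1 : Nat) : Int) - 1 = (m : Int) by push_cast; ring,
        show ((m + 1 : Nat) : Int) = (m : Int) + 1 by push_cast; ring]
    rw [← hv]

-- ===== VERDICT (by name: the statement is the Claim_ definition above) =====
theorem number_of_hops_spec : Claim_equal_number_of_hops := by
  intro n rem _ _
  unfold Spec_number_of_hops number_of_hops number_of_hops_alt
  by_cases h0 : n < 0
  · rw [hopsA]; simp [h0]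
  · have hInv : MemoInv rem rem := by intro j hj; left; rfl
    have hA : (hopsA n rem).1 = gPure n rem :=
      (hopsA_correct (n.toNat + 1) n (by omega) rem rem hInv).1
    rw [hA]
    rw [if_neg h0]
    rw [show n = ((n.toNat : Nat) : Int) by omega, foldB rem n.toNat]
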